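-- pv_equiv track=rewrite | github.com/RifiPhoe/NSI | exercice7 croisement routier V2.py | croisement
-- ===== SOURCE A (Python) =====
-- def vide(f):
--     ''' renvoie True si la file est vide False sinon'''
--     return f==[]
--
-- def enfiler(f,x):
--     #ajoute x à la file f"
--     return f.append(x)
--
-- def defiler(f):
--     #enlève et renvoie le premier élément de la file
--     assert not vide(f), "file vide"
--     return f.pop(0)
--
-- def sommet(f):
--     return f[0]
--
-- def croisement(file1, file2):
--     file3=[]
--     while (vide(file1) != True) or (vide(file2)!= True):
--         if (vide(file1) != True) and (vide(file2)!= True):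
--             if sommet(file1)==1 and sommet(file2)==2:
--                 enfiler(file3,1)
--                 defiler(file1)
--             elif sommet(file1)==1 and sommet(file2)==0:
--                 enfiler(file3,1)
--                 defiler(file1)
--             elif sommet(file1)==0 and sommet(file2)==2:
--                 enfiler(file3,2)
--                 defiler(file1)
--                 defiler(file2)
--             else:
--                enfiler(file3,0)
--                defiler(file1)
--                defiler(file2)
--         elif (vide(file1) == True):
--             enfiler(file3,sommet(file2))
--             defiler(file2)
--         else:
--             enfiler(file3,sommet(file1))
--             defiler(file1)
--
--     return file3
-- ===== SOURCE B (Python) =====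
-- def croisement(file1, file2):
--     # file2-driven run traversal: for each front vehicle y of file2, the run of
--     # leading 1s in file1 passes first (each emits 1, only when y is 0 or 2),
--     # then one pairing step; leftovers are appended by slicing. No pop(0) shifts:
--     # linear time. Return value only: unlike A, does not empty the input lists.
--     out = []
--     i, n = 0, len(file1)
--     for j, y in enumerate(file2):
--         if y == 0 or y == 2:
--             while i < n and file1[i] == 1:
--                 out.append(1)
--                 i += 1
--         if i == n:
--             out.extend(file2[j:])
--             return out
--         out.append(2 if y == 2 and file1[i] == 0 else 0)
--         i += 1
--     out.extend(file1[i:])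
--     return out
-- ===== Notes on version B (the rewrite author's own statement) =====
-- stated objective: faster
-- what changed: B is driven by file2 instead of simulating the queues: for each front element of file2 it emits the run of leading 1s of file1 (tracked by an index), then one pairing step, and appends leftovers by slicing, replacing A's pop(0)-mutating whole-loop simulation.
import Mathlib
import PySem

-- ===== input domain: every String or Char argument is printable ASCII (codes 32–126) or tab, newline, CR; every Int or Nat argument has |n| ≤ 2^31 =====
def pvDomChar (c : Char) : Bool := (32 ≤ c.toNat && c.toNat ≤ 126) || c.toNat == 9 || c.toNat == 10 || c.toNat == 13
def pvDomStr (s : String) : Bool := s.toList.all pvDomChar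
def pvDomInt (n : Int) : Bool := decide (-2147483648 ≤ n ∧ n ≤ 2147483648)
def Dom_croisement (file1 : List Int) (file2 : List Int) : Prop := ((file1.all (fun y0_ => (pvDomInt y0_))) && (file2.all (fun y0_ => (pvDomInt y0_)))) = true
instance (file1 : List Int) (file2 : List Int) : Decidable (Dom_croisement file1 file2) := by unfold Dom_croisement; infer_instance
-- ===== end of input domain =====

-- B re-derives the output driven by file2: each front vehicle of file2 first lets the run of
-- leading 1s of file1 pass, then one pairing step; leftovers are appended by slicing (linear
-- time, no pop(0) shifts). A empties both input lists in place; B does not — the equivalence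
-- proved is about the return value only.


-- ===== PORT A =====
-- A's while loop: both-nonempty branch with four priority cases, then the
-- file1-empty branch, then the file2-empty branch; loop ends when both are empty.
def croisement (file1 : List Int) (file2 : List Int) : List Int :=
  match file1, file2 with
  | [], [] => []
  | x :: t1, y :: t2 =>
    if x = 1 ∧ y = 2 then 1 :: croisement t1 (y :: t2)
    else if x = 1 ∧ y = 0 then 1 :: croisement t1 (y :: t2)
    else if x = 0 ∧ y = 2 then 2 :: croisement t1 t2
    else 0 :: croisement t1 t2
  | [], y :: t2 => y :: croisement [] t2
  | x :: t1, [] => x :: croisement t1 []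
termination_by file1.length + file2.length

-- ===== PORT B =====
-- B's inner while loop: let the run of leading 1s of file1 pass, emitting a 1 for each;
-- returns the emitted 1s together with the rest of file1 (the index i advanced past the run).
def stripOnes (f : List Int) : List Int × List Int :=
  match f with
  | x :: t => if x = 1 then let r := stripOnes t; (1 :: r.1, r.2) else ([], x :: t)
  | [] => ([], [])

-- B's for loop over file2: strip the leading 1s when y is 0 or 2, then either append the
-- rest of file2 (file1 exhausted: the 'return' with file2[j:]) or do one pairing step.
def croisementAltGo (f1 : List Int) (f2 : List Int) : List Int :=
  match f2 with
  | [] => f1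
  | y :: t2 =>
    let r := if y = 0 ∨ y = 2 then stripOnes f1 else ([], f1)
    r.1 ++ (match r.2 with
      | [] => y :: t2
      | x :: t1 => (if y = 2 ∧ x = 0 then 2 else 0) :: croisementAltGo t1 t2)
termination_by f2.length

def croisement_alt (file1 : List Int) (file2 : List Int) : List Int :=
  croisementAltGo file1 file2

-- ===== PRECONDITION & SPEC =====
def Spec_croisement (file1 : List Int) (file2 : List Int) (out : List Int) : Prop := out = croisement_alt file1 file2
instance (file1 : List Int) (file2 : List Int) (out : List Int) : Decidable (Spec_croisement file1 file2 out) := by unfold Spec_croisement; infer_instance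

-- ===== CLAIM (what is proved, stated in full; the proofs are below) =====
def Claim_equal_croisement : Prop := ∀ (file1 : List Int) (file2 : List Int), Dom_croisement file1 file2 → Spec_croisement file1 file2 (croisement file1 file2)

-- ===== LEMMAS AND PROOFS =====
theorem croisement_nil_left (f2 : List Int) : croisement [] f2 = f2 := by
  induction f2 with
  | nil => simp [croisement]
  | cons y t ih => simp [croisement, ih]

theorem croisement_nil_right (f1 : List Int) : croisement f1 [] = f1 := by
  induction f1 with
  | nil => simp [croisement]
  | cons x t ih => simp [croisement, ih]

-- while y ∈ {0,2}, A peels the leading 1s of file1 one at a time, exactly as stripOnes does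
theorem croisement_strip (f1 : List Int) (y : Int) (t2 : List Int) (hy : y = 0 ∨ y = 2) :
    croisement f1 (y :: t2) = (stripOnes f1).1 ++ croisement (stripOnes f1).2 (y :: t2) := by
  induction f1 with
  | nil => simp [stripOnes]
  | cons x t1 ih =>
    by_cases hx : x = 1
    · subst hx
      have step : croisement (1 :: t1) (y :: t2) = 1 :: croisement t1 (y :: t2) := by
        rcases hy with h | h <;> subst h <;> simp [croisement]
      simp [stripOnes, step, ih]
    · simp [stripOnes, hx]

theorem croisement_eq_go (f2 : List Int) : ∀ f1 : List Int,
    croisement f1 f2 = croisementAltGo f1 f2 := by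
  induction f2 with
  | nil => intro f1; simp [croisementAltGo, croisement_nil_right]
  | cons y t2 ih =>
    intro f1
    by_cases hy : y = 0 ∨ y = 2
    · rw [croisement_strip f1 y t2 hy]
      simp only [croisementAltGo, hy, if_pos]
      rcases hr : (stripOnes f1).2 with _ | ⟨x, t1⟩
      · simp [croisement_nil_left]
      · have hx1 : x ≠ 1 := by
          have : ∀ f : List Int, ∀ z zs, (stripOnes f).2 = z :: zs → z ≠ 1 := by
            intro f
            induction f with
            | nil => intro z zs h; simp [stripOnes] at h
            | cons a t iht =>
              intro z zs h
              by_cases ha : a = 1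
              · subst ha; simp [stripOnes] at h; exact iht _ _ h
              · simp [stripOnes, ha] at h; simpa [← h.1] using ha
          exact this f1 x t1 hr
        have step : croisement (x :: t1) (y :: t2) =
            (if y = 2 ∧ x = 0 then (2:Int) else 0) :: croisement t1 t2 := by
          rcases hy with h | h <;> subst h <;>
            · simp only [croisement]
              split_ifs <;> simp_all
        simp [step, ih]
    · cases f1 with
      | nil =>
        simp [croisement_nil_left, croisementAltGo, hy]
      | cons x t1 =>
        have hy2 : y ≠ 2 := fun h => hy (Or.inr h)
        have hy0 : y ≠ 0 := fun h => hy (Or.inl h)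
        have step : croisement (x :: t1) (y :: t2) = 0 :: croisement t1 t2 := by
          simp only [croisement]
          split_ifs <;> simp_all
        simp [step, croisementAltGo, hy0, hy2, ih]

-- ===== VERDICT (by name: the statement is the Claim_ definition above) =====
theorem croisement_spec : Claim_equal_croisement := by
  intro f1 f2 _
  exact croisement_eq_go f2 f1
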